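-- pv_equiv track=rewrite | github.com/MrBrantCode/unitest_baseline | mut_generate/mist_train_taco/taco_12638/solution.py | find_valid_positions
-- ===== SOURCE A (Python) =====
-- def find_valid_positions(n, m, p, a, b):
--     def hash_elem(x):
--         x = x * 1662634645 + 32544235 & 4294967295
--         x = (x >> 13) + (x << 19) & 4294967295
--         x = x * 361352451 & 4294967295
--         return x
--
--     c = [hash_elem(elem) for elem in a]
--     c_new = [sum([c[q + p * i] for i in range(m)]) for q in range(min(p, max(0, n - (m - 1) * p)))]
--
--     for q in range(p, n - (m - 1) * p):
--         prev = c_new[q - p]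
--         c_new.append(prev - c[q - p] + c[q + p * (m - 1)])
--
--     b_check = sum([hash_elem(elem) for elem in b])
--     ans1 = 0
--     ans = []
--
--     for q in range(n - (m - 1) * p):
--         c_check = c_new[q]
--         if b_check != c_check:
--             continue
--         else:
--             ans1 += 1
--             ans.append(q + 1)
--
--     return ans1, ans
-- ===== SOURCE B (Python) =====
-- def find_valid_positions(n, m, p, a, b):
--     def hash_elem(x):
--         x = x * 1662634645 + 32544235 & 4294967295
--         x = (x >> 13) + (x << 19) & 4294967295
--         x = x * 361352451 & 4294967295
--         return x
--
--     c = [hash_elem(x) for x in a]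
--     b_check = sum(hash_elem(x) for x in b)
--     ans = [q + 1 for q in range(n - (m - 1) * p)
--            if sum(c[q + p * i] for i in range(m)) == b_check]
--     return len(ans), ans
-- ===== Notes on version B (the rewrite author's own statement) =====
-- stated objective: simpler
-- what changed: Drops A's incremental sliding-window list c_new (seed block plus rolling update prev - c[q-p] + c[q+p*(m-1)]) and instead recomputes each window's hashed sum from scratch in a single comprehension, comparing it to b_check directly.
-- outside the precondition, e.g. on find_valid_positions(1, -1, 1, [1, 2], []): A returns (2, [1, 3]), B returns (3, [1, 2, 3])
import Mathlib
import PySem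

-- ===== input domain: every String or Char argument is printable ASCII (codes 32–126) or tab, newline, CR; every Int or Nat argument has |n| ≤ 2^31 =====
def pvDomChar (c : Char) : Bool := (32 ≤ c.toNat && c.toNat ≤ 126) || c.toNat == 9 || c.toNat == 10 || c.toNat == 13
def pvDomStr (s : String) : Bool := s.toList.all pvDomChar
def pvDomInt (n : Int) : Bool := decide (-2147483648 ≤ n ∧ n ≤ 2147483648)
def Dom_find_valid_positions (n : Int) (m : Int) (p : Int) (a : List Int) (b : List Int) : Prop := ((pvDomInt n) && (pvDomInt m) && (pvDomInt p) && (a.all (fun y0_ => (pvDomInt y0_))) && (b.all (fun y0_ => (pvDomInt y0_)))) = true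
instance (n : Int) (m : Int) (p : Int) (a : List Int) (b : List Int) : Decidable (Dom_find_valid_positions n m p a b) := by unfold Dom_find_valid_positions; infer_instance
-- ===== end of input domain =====

-- B replaces A's incremental sliding-window list by a direct per-window recomputation (simpler, one comprehension).

-- ===== PORT A =====
-- inner hash_elem, identical in both Pythons: '& 4294967295' is PySem.Int.band, '>>'/'<<' are Lean's >>>/<<< (exact per PySem)
def hash_elem (x : Int) : Int :=
  let x1 := PySem.Int.band (x * 1662634645 + 32544235) 4294967295
  let x2 := PySem.Int.band ((x1 >>> (13 : Nat)) + (x1 <<< (19 : Nat))) 4294967295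
  PySem.Int.band (x2 * 361352451) 4294967295

def find_valid_positions (n : Int) (m : Int) (p : Int) (a : List Int) (b : List Int) : Int × List Int :=
  let c := a.map hash_elem
  let c_new0 :=
    (PySem.List.pyRange 0 (min p (max 0 (n - (m - 1) * p))) 1).map
      (fun q => ((PySem.List.pyRange 0 m 1).map (fun i => PySem.List.pyGetD c (q + p * i) 0)).sum)
  let c_new :=
    (PySem.List.pyRange p (n - (m - 1) * p) 1).foldl
      (fun acc q =>
        let prev := PySem.List.pyGetD acc (q - p) 0
        acc ++ [prev - PySem.List.pyGetD c (q - p) 0 + PySem.List.pyGetD c (q + p * (m - 1)) 0])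
      c_new0
  let b_check := (b.map hash_elem).sum
  (PySem.List.pyRange 0 (n - (m - 1) * p) 1).foldl
    (fun (s : Int × List Int) q =>
      let c_check := PySem.List.pyGetD c_new q 0
      if b_check ≠ c_check then s else (s.1 + 1, s.2 ++ [q + 1]))
    (0, [])

-- ===== PORT B =====
def find_valid_positions_alt (n : Int) (m : Int) (p : Int) (a : List Int) (b : List Int) : Int × List Int :=
  let c := a.map hash_elem
  let b_check := (b.map hash_elem).sum
  let ans :=
    ((PySem.List.pyRange 0 (n - (m - 1) * p) 1).filter
        (fun q => ((PySem.List.pyRange 0 m 1).map (fun i => PySem.List.pyGetD c (q + p * i) 0)).sum == b_check)).map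
      (fun q => q + 1)
  ((ans.length : Int), ans)

-- ===== PRECONDITION & SPEC =====
-- Pre_ restricts to the problem's natural domain (positive stride p and window count m with n ≤ len(a), or the
-- degenerate case where every loop is empty): it excludes inputs where Python A raises IndexError, and inputs with
-- m ≤ 0 on which A returns accidental values built from leftover sliding-window state and negative-index wraparound.
def Pre_find_valid_positions (n : Int) (m : Int) (p : Int) (a : List Int) (b : List Int) : Prop :=
  (n - (m - 1) * p ≤ 0 ∧ n - (m - 1) * p ≤ p) ∨ (1 ≤ p ∧ 1 ≤ m ∧ n ≤ (a.length : Int))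
instance (n : Int) (m : Int) (p : Int) (a : List Int) (b : List Int) : Decidable (Pre_find_valid_positions n m p a b) := by unfold Pre_find_valid_positions; infer_instance

def pvWitness_find_valid_positions : Int × Int × Int × List Int × List Int := (3, 2, 1, [1, 2, 3], [1, 2])

def Spec_find_valid_positions (n : Int) (m : Int) (p : Int) (a : List Int) (b : List Int) (out : Int × List Int) : Prop := out = find_valid_positions_alt n m p a b
instance (n : Int) (m : Int) (p : Int) (a : List Int) (b : List Int) (out : Int × List Int) : Decidable (Spec_find_valid_positions n m p a b out) := by unfold Spec_find_valid_positions; infer_instance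

-- ===== CLAIM (what is proved, stated in full; the proofs are below) =====
def Claim_equal_find_valid_positions : Prop := ∀ (n : Int) (m : Int) (p : Int) (a : List Int) (b : List Int), Dom_find_valid_positions n m p a b → Pre_find_valid_positions n m p a b → Spec_find_valid_positions n m p a b (find_valid_positions n m p a b)

-- ===== LEMMAS AND PROOFS =====

-- A's answer-collecting fold is length-and-map of the filtered range.
lemma fold_count (g : Int → Int) (bc : Int) (qs : List Int) :
    ∀ (c0 : Int) (l0 : List Int),
      qs.foldl (fun (s : Int × List Int) q => if bc ≠ g q then s else (s.1 + 1, s.2 ++ [q + 1])) (c0, l0)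
        = (c0 + ((qs.filter (fun q => g q == bc)).length : Int),
           l0 ++ (qs.filter (fun q => g q == bc)).map (fun q => q + 1)) := by
  induction qs with
  | nil => intro c0 l0; simp
  | cons q qs ih =>
    intro c0 l0
    rw [List.foldl_cons]
    by_cases h : g q = bc
    · rw [if_neg (by simp [h]), List.filter_cons_of_pos (by simp [h]), ih]
      refine Prod.ext ?_ ?_
      · simp; omega
      · simp
    · rw [if_pos (fun hh => h hh.symm), List.filter_cons_of_neg (by simp [h]), ih]

-- last-element / first-element split of the same strided sum over List.range
lemma tele_range (cat : Int → Int) (p q : Int) (M : Nat) :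
    ((List.range (M + 1)).map (fun (k : Nat) => cat (q + p * (k : Int)))).sum
      = ((List.range (M + 1)).map (fun (k : Nat) => cat (q - p + p * (k : Int)))).sum
        - cat (q - p) + cat (q + p * (M : Int)) := by
  have h1 : ((List.range (M + 1)).map (fun (k : Nat) => cat (q + p * (k : Int)))).sum
      = ((List.range M).map (fun (k : Nat) => cat (q + p * (k : Int)))).sum + cat (q + p * (M : Int)) := by
    rw [List.range_succ]; simp
  have h2 : ((List.range (M + 1)).map (fun (k : Nat) => cat (q - p + p * (k : Int)))).sum
      = cat (q - p) + ((List.range M).map (fun (k : Nat) => cat (q + p * (k : Int)))).sum := by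
    rw [List.range_succ_eq_map]
    simp only [List.map_cons, List.map_map, List.sum_cons]
    norm_num
    congr 1
    apply List.map_congr_left
    intro k _
    simp only [Function.comp_apply]
    congr 1
    push_cast
    ring
  rw [h1, h2]; ring

-- telescoping: the window sum at q equals the window sum at q - p minus the leaving term plus the entering term
lemma window_telescope (cat : Int → Int) (m p q : Int) (hm : 1 ≤ m) :
    ((PySem.List.pyRange 0 m 1).map (fun i => cat (q + p * i))).sum
      = ((PySem.List.pyRange 0 m 1).map (fun i => cat (q - p + p * i))).sum
        - cat (q - p) + cat (q + p * (m - 1)) := by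
  obtain ⟨M, hM⟩ : ∃ M : Nat, m = (M : Int) + 1 := ⟨(m - 1).toNat, by omega⟩
  rw [PySem.List.pyRange_one 0 m]
  have hT : (m - 0).toNat = M + 1 := by omega
  rw [hT]
  rw [List.map_map, List.map_map]
  have e1 : ((fun i => cat (q + p * i)) ∘ fun k : Nat => (0 : Int) + (k : Int))
      = fun k : Nat => cat (q + p * (k : Int)) := by funext k; simp
  have e2 : ((fun i => cat (q - p + p * i)) ∘ fun k : Nat => (0 : Int) + (k : Int))
      = fun k : Nat => cat (q - p + p * (k : Int)) := by funext k; simp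
  have hlast : q + p * (m - 1) = q + p * (M : Int) := by rw [hM]; ring
  rw [e1, e2, hlast]
  exact tele_range cat p q M

-- incremental construction of c_new produces exactly the direct window sums
lemma build_inv (cat W : Int → Int) (p s : Int) (hp : 1 ≤ p)
    (hrec : ∀ q, p ≤ q → W q = W (q - p) - cat (q - p) + cat (q + s)) (L : Int) :
    ∀ (k : Nat) (t : Int), p ≤ t → t ≤ L → (L - t).toNat = k →
      (PySem.List.pyRange t L 1).foldl
          (fun acc q =>
            let prev := PySem.List.pyGetD acc (q - p) 0
            acc ++ [prev - cat (q - p) + cat (q + s)])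
          ((PySem.List.pyRange 0 t 1).map W)
        = (PySem.List.pyRange 0 L 1).map W := by
  intro k
  induction k with
  | zero =>
    intro t ht htL hk
    have : t = L := by omega
    subst this
    rw [PySem.List.pyRange_one_eq_nil le_rfl]
    rfl
  | succ k ih =>
    intro t ht htL hk
    have hlt : t < L := by omega
    rw [PySem.List.pyRange_one_cons hlt, List.foldl_cons]
    have hget : PySem.List.pyGetD ((PySem.List.pyRange 0 t 1).map W) (t - p) 0 = W (t - p) :=
      PySem.List.pyGetD_map_pyRange_of_nonneg W t (t - p) 0 (by omega) (by omega)
    have hstep : (PySem.List.pyRange 0 t 1).map W ++ [W (t - p) - cat (t - p) + cat (t + s)]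
        = (PySem.List.pyRange 0 (t + 1) 1).map W := by
      rw [PySem.List.pyRange_one_succ_right (show (0 : Int) ≤ t by omega), List.map_append]
      simp only [List.map_cons, List.map_nil]
      rw [← hrec t ht]
    simp only [hget, hstep]
    exact ih (t + 1) (by omega) (by omega) (by omega)

-- ===== VERDICT (by name: the statement is the Claim_ definition above) =====
theorem find_valid_positions_spec : Claim_equal_find_valid_positions := by
  unfold Claim_equal_find_valid_positions
  intro n m p a b hdom hpre
  unfold Spec_find_valid_positions find_valid_positions find_valid_positions_alt
  dsimp only
  set L := n - (m - 1) * p with hLdef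
  set c := a.map hash_elem with hc
  set bc := (b.map hash_elem).sum with hbc
  set W : Int → Int := fun q => ((PySem.List.pyRange 0 m 1).map (fun i => PySem.List.pyGetD c (q + p * i) 0)).sum with hW
  by_cases hL : L ≤ 0
  · have hLp : L ≤ p := by
      rcases hpre with ⟨_, h⟩ | ⟨hp1, _, _⟩
      · exact h
      · omega
    rw [PySem.List.pyRange_one_eq_nil hL,
        PySem.List.pyRange_one_eq_nil hLp,
        PySem.List.pyRange_one_eq_nil (show min p (max 0 L) ≤ 0 by omega)]
    rfl
  · rw [not_le] at hL
    obtain ⟨hp1, hm1, -⟩ : 1 ≤ p ∧ 1 ≤ m ∧ n ≤ (a.length : Int) := by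
      rcases hpre with ⟨h, _⟩ | h
      · omega
      · exact h
    have hrec : ∀ q, p ≤ q → W q = W (q - p)
        - PySem.List.pyGetD c (q - p) 0 + PySem.List.pyGetD c (q + p * (m - 1)) 0 := by
      intro q _
      exact window_telescope (fun j => PySem.List.pyGetD c j 0) m p q hm1
    have hcnew :
        (PySem.List.pyRange p L 1).foldl
            (fun acc q =>
              let prev := PySem.List.pyGetD acc (q - p) 0
              acc ++ [prev - PySem.List.pyGetD c (q - p) 0 + PySem.List.pyGetD c (q + p * (m - 1)) 0])
            ((PySem.List.pyRange 0 (min p (max 0 L)) 1).map W)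
          = (PySem.List.pyRange 0 L 1).map W := by
      by_cases hpL : p ≤ L
      · have hmin : min p (max 0 L) = p := by omega
        rw [hmin]
        exact build_inv (fun j => PySem.List.pyGetD c j 0) W p (p * (m - 1)) hp1 hrec L
          (L - p).toNat p le_rfl hpL rfl
      · have hmin : min p (max 0 L) = L := by omega
        rw [hmin, PySem.List.pyRange_one_eq_nil (show L ≤ p by omega)]
        rfl
    rw [hcnew]
    have hcongr :
        (PySem.List.pyRange 0 L 1).foldl
            (fun (s : Int × List Int) q =>
              let c_check := PySem.List.pyGetD ((PySem.List.pyRange 0 L 1).map W) q 0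
              if bc ≠ c_check then s else (s.1 + 1, s.2 ++ [q + 1]))
            (0, [])
          = (PySem.List.pyRange 0 L 1).foldl
            (fun (s : Int × List Int) q => if bc ≠ W q then s else (s.1 + 1, s.2 ++ [q + 1]))
            (0, []) := by
      apply PySem.List.foldl_congr_mem
      intro acc q hq
      rw [PySem.List.mem_pyRange_one] at hq
      simp only [PySem.List.pyGetD_map_pyRange_of_nonneg W L q 0 hq.1 hq.2]
    rw [hcongr, fold_count W bc]
    simp only [hW]
    simp
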